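-- pv_equiv track=rewrite | github.com/ksumini/Algorithm-Study2.0 | Programmers/광물 캐기/osmin.py | get_fatigue
-- ===== SOURCE A (Python) =====
-- def get_fatigue(mineral):
--     out = [len(mineral), 0, 0]
--     for m in mineral:
--         if m == 'diamond':
--             out[1] += 5
--             out[2] += 25
--         elif m == 'iron':
--             out[1] += 1
--             out[2] += 5
--         else:
--             out[1] += 1
--             out[2] += 1
--     return out
-- ===== SOURCE B (Python) =====
-- def get_fatigue(mineral):
--     d = mineral.count('diamond')
--     i = mineral.count('iron')
--     o = len(mineral) - d - i
--     return [d + i + o, 5 * d + i + o, 25 * d + 5 * i + o]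
-- ===== Notes on version B (the rewrite author's own statement) =====
-- stated objective: simpler
-- what changed: Replaces the per-element branch-and-accumulate loop over a mutable 3-slot list with category counts (list.count) followed by closed-form arithmetic for the three sums.
import Mathlib
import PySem

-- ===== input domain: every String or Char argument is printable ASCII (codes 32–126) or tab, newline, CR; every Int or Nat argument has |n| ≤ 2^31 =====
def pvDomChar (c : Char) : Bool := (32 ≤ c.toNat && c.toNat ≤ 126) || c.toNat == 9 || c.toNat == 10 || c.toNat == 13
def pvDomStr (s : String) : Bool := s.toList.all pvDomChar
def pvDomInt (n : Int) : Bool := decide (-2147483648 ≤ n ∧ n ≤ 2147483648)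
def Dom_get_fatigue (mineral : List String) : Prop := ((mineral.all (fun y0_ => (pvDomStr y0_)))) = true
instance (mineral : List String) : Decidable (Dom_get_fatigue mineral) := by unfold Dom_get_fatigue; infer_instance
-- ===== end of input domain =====

-- ===== PORT A =====
-- One honest line: B tallies the three categories and computes the triple by closed-form arithmetic; objective: simpler.
def get_fatigue (mineral : List String) : List Int :=
  mineral.foldl
    (fun out m =>
      if m == "diamond" then [out[0]!, out[1]! + 5, out[2]! + 25]
      else if m == "iron" then [out[0]!, out[1]! + 1, out[2]! + 5]
      else [out[0]!, out[1]! + 1, out[2]! + 1])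
    [(mineral.length : Int), 0, 0]

-- ===== PORT B =====
def get_fatigue_alt (mineral : List String) : List Int :=
  let d : Int := PySem.List.count mineral "diamond"
  let i : Int := PySem.List.count mineral "iron"
  let o : Int := (mineral.length : Int) - d - i
  [d + i + o, 5 * d + i + o, 25 * d + 5 * i + o]

-- ===== PRECONDITION & SPEC =====
def Spec_get_fatigue (mineral : List String) (out : List Int) : Prop := out = get_fatigue_alt mineral
instance (mineral : List String) (out : List Int) : Decidable (Spec_get_fatigue mineral out) := by unfold Spec_get_fatigue; infer_instance

-- ===== CLAIM (what is proved, stated in full; the proofs are below) =====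
def Claim_equal_get_fatigue : Prop := ∀ (mineral : List String), Dom_get_fatigue mineral → Spec_get_fatigue mineral (get_fatigue mineral)

-- ===== LEMMAS AND PROOFS =====

-- ===== VERDICT (by name: the statement is the Claim_ definition above) =====
lemma foldl_char (mineral : List String) (a b c : Int) :
    mineral.foldl
      (fun (out : List Int) m =>
        if m == "diamond" then [out[0]!, out[1]! + 5, out[2]! + 25]
        else if m == "iron" then [out[0]!, out[1]! + 1, out[2]! + 5]
        else [out[0]!, out[1]! + 1, out[2]! + 1])
      [a, b, c] =
    [a,
     b + 5 * (PySem.List.count mineral "diamond" : Int) + (PySem.List.count mineral "iron" : Int)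
       + ((mineral.length : Int) - (PySem.List.count mineral "diamond" : Int) - (PySem.List.count mineral "iron" : Int)),
     c + 25 * (PySem.List.count mineral "diamond" : Int) + 5 * (PySem.List.count mineral "iron" : Int)
       + ((mineral.length : Int) - (PySem.List.count mineral "diamond" : Int) - (PySem.List.count mineral "iron" : Int))] := by
  induction mineral generalizing a b c with
  | nil => simp [PySem.List.count]
  | cons x xs ih =>
    by_cases hd : x = "diamond"
    · subst hd
      simp only [List.foldl_cons, beq_self_eq_true, if_true, List.getElem!_cons_zero,
        List.getElem!_cons_succ]
      rw [ih]
      simp only [PySem.List.count, List.count_cons, List.length_cons, beq_iff_eq,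
        List.cons.injEq, and_true, true_and]
      simp only [if_true]
      push_cast
      constructor <;> ring
    · by_cases hi : x = "iron"
      · subst hi
        have h1 : (("iron" : String) == "diamond") = false := by decide
        simp only [List.foldl_cons, h1, Bool.false_eq_true, if_false, beq_self_eq_true, if_true,
          List.getElem!_cons_zero, List.getElem!_cons_succ]
        rw [ih]
        simp only [PySem.List.count, List.count_cons, List.length_cons, beq_iff_eq,
          List.cons.injEq, true_and]
        simp only [if_true]
        push_cast
        refine ⟨by ring, by ring, trivial⟩
      · have h1 : (x == "diamond") = false := by simp [hd]
        have h2 : (x == "iron") = false := by simp [hi]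
        simp only [List.foldl_cons, h1, h2, Bool.false_eq_true, if_false,
          List.getElem!_cons_zero, List.getElem!_cons_succ]
        rw [ih]
        simp only [PySem.List.count, List.count_cons, List.length_cons, beq_iff_eq,
          List.cons.injEq, true_and]
        rw [if_neg hd, if_neg hi]
        refine ⟨?_, ?_, trivial⟩ <;> push_cast <;> ring

theorem get_fatigue_spec : Claim_equal_get_fatigue := by
  intro mineral _
  unfold Spec_get_fatigue get_fatigue get_fatigue_alt
  rw [foldl_char]
  simp only [List.cons.injEq, and_true]
  refine ⟨by ring, by ring, by ring⟩
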